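-- pv_equiv track=rewrite | github.com/sai-surya-pavuluri/coding-challenges | Temple of Digits/solution.py | unlockScroll
-- ===== SOURCE A (Python) =====
-- from typing import List
--
-- def unlockScroll(n: int, k: int) -> List[int]:
--     valid_codes = []
--
--     def explore_path(path):
--         # If path has reached required length, record it
--         if len(path) == n:
--             valid_codes.append(int("".join(map(str, path))))
--             return
--
--         for digit in range(10):
--             if not path and digit == 0:   # lock forbids leading zero
--                 continue
--             if path and abs(digit - path[-1]) != k:  # prune invalid paths
--                 continue
--
--             path.append(digit)
--             explore_path(path)
--             path.pop()
--
--     explore_path([])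
--     return valid_codes
-- ===== SOURCE B (Python) =====
-- from typing import List
--
-- def unlockScroll(n: int, k: int) -> List[int]:
--     # bottom-up: grow all valid digit paths one position per round, convert at the end
--     paths = [[d] for d in range(1, 10)] if n >= 1 else []
--     for _ in range(n - 1):
--         if not paths:
--             break
--         paths = [p + [d] for p in paths for d in range(10) if abs(d - p[-1]) == k]
--     return [int("".join(map(str, p))) for p in paths]
-- ===== Notes on version B (the rewrite author's own statement) =====
-- stated objective: alternative
-- what changed: Replaces A's recursive backtracking (append/recurse/pop on one shared mutable path) by an iterative bottom-up pass that grows the whole list of valid digit paths one position per round (with an early exit once no path survives) and converts them to ints at the end.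
import Mathlib
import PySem

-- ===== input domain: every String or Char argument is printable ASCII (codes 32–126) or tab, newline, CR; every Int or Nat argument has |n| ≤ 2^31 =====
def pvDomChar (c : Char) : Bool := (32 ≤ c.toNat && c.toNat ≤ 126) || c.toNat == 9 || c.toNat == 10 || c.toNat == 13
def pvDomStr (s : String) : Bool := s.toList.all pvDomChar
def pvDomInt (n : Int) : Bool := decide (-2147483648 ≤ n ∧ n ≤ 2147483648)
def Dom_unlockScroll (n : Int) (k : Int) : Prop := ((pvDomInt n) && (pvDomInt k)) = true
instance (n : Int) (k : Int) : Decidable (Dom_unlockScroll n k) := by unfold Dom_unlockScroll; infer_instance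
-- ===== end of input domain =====

-- B replaces A's recursive backtracking by an iterative level-by-level growth of all valid
-- digit paths (no recursion); objective: alternative decomposition, same output list.

-- ===== PORT A =====
-- path[-1] (both Pythons read it only on nonempty paths; the getD 0 default is never the taken branch there)
def pvLast (path : List Int) : Int := (PySem.List.pyGet? path (-1)).getD 0
-- int("".join(map(str, path))); the .getD 0 branch is only reachable for an empty path (n = 0),
-- which Pre_ excludes (Python raises ValueError there)
def pvEmit (path : List Int) : Int :=
  (PySem.Int.ofStr? (PySem.Str.join "" (path.map PySem.Int.toStr))).getD 0

-- explore_path; fuel only makes the recursion structural: on Pre_ it is never exhausted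
def pvExplore (n : Int) (k : Int) : Nat → List Int → List Int → List Int
  | fuel, path, acc =>
    if (path.length : Int) = n then
      acc ++ [pvEmit path]
    else
      match fuel with
      | 0 => acc
      | fuel + 1 =>
        (PySem.List.pyRange 0 10 1).foldl (fun acc d =>
          if path = [] ∧ d = 0 then acc
          else if path ≠ [] ∧ ¬ (((d - pvLast path).natAbs : Int) = k) then acc
          else pvExplore n k fuel (path ++ [d]) acc) acc

def unlockScroll (n : Int) (k : Int) : List Int := pvExplore n k n.toNat [] []

-- ===== PORT B =====
-- one growth round: [p + [d] for p in paths for d in range(10) if abs(d - p[-1]) == k]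
def pvStep (k : Int) (paths : List (List Int)) : List (List Int) :=
  paths.flatMap (fun p =>
    ((PySem.List.pyRange 0 10 1).filter (fun d => ((d - pvLast p).natAbs : Int) = k)).map
      (fun d => p ++ [d]))

-- the for-loop with its `if not paths: break` early exit, as a counted loop that stops on []
def pvGrow (k : Int) : Nat → List (List Int) → List (List Int)
  | 0, ps => ps
  | m + 1, ps => if ps = [] then ps else pvGrow k m (pvStep k ps)

def unlockScroll_alt (n : Int) (k : Int) : List Int :=
  (pvGrow k (n - 1).toNat
      (if 1 ≤ n then (PySem.List.pyRange 1 10 1).map (fun d => [d]) else [])).map pvEmit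

-- ===== PRECONDITION & SPEC =====
-- Pre_ excludes exactly the inputs on which A raises: n = 0 (int('') raises ValueError) and
-- n < 0 with 0 ≤ k ≤ 9, where the recursion can never reach length n and A's recursion runs away
-- (RecursionError); for n < 0 with k outside 0..9 every continuation is pruned and A returns [].
def Pre_unlockScroll (n : Int) (k : Int) : Prop :=
  1 ≤ n ∨ (n < 0 ∧ (k < 0 ∨ 10 ≤ k))
instance (n : Int) (k : Int) : Decidable (Pre_unlockScroll n k) := by
  unfold Pre_unlockScroll; infer_instance
def pvWitness_unlockScroll : Int × Int := (3, 2)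

def Spec_unlockScroll (n : Int) (k : Int) (out : List Int) : Prop := out = unlockScroll_alt n k
instance (n : Int) (k : Int) (out : List Int) : Decidable (Spec_unlockScroll n k out) := by
  unfold Spec_unlockScroll; infer_instance

-- ===== CLAIM (what is proved, stated in full; the proofs are below) =====
def Claim_equal_unlockScroll : Prop := ∀ (n : Int) (k : Int), Dom_unlockScroll n k → Pre_unlockScroll n k → Spec_unlockScroll n k (unlockScroll n k)

-- ===== LEMMAS AND PROOFS =====

-- digits allowed after a digit `last` (shared characterisation of both loops' pruning)
def pvNexts (k : Int) (last : Int) : List Int :=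
  (PySem.List.pyRange 0 10 1).filter (fun d => ((d - last).natAbs : Int) = k)

-- all valid completions of length m after a digit `last`
def pvComp (k : Int) : Nat → Int → List (List Int)
  | 0, _ => [[]]
  | m + 1, last => (pvNexts k last).flatMap (fun d => (pvComp k m d).map (fun q => d :: q))

theorem pvLast_append (p : List Int) (d : Int) : pvLast (p ++ [d]) = d := by
  have h : PySem.List.pyIdx? (p.length + 1) (-1) = some p.length := by
    unfold PySem.List.pyIdx?
    rw [if_neg (by omega), if_pos (by push_cast; omega)]
    simp
  simp [pvLast, PySem.List.pyGet?, h]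

theorem pvLast_singleton (d : Int) : pvLast [d] = d := pvLast_append [] d

theorem pvExplore_eq (n k : Int) : ∀ (fuel : Nat) (path acc : List Int), path ≠ [] →
    (path.length : Int) + fuel = n →
    pvExplore n k fuel path acc
      = acc ++ (pvComp k fuel (pvLast path)).map (fun q => pvEmit (path ++ q)) := by
  intro fuel
  induction fuel with
  | zero =>
    intro path acc hne hlen
    have h : (path.length : Int) = n := by push_cast at hlen; omega
    rw [pvExplore]
    simp [h, pvComp]
  | succ m ih =>
    intro path acc hne hlen
    have h : ¬ (path.length : Int) = n := by push_cast at hlen; omega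
    rw [pvExplore, if_neg h]
    have hstep : ∀ (a : List Int), ∀ d ∈ PySem.List.pyRange 0 10 1,
        (if path = [] ∧ d = 0 then a
         else if path ≠ [] ∧ ¬ (((d - pvLast path).natAbs : Int) = k) then a
         else pvExplore n k m (path ++ [d]) a)
        = (if (((d - pvLast path).natAbs : Int) = k) then
             a ++ (pvComp k m d).map (fun q => pvEmit (path ++ d :: q))
           else a) := by
      intro a d _
      rw [if_neg (by simp [hne])]
      by_cases hk : (((d - pvLast path).natAbs : Int) = k)
      · rw [if_neg (by simp [hk]), if_pos hk]
        rw [ih (path ++ [d]) a (by simp) (by push_cast at hlen ⊢; simp; omega)]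
        rw [pvLast_append]
        simp [List.append_assoc]
      · rw [if_pos ⟨hne, hk⟩, if_neg hk]
    rw [PySem.List.foldl_congr_mem _ _ _ _ hstep]
    rw [PySem.List.foldl_ite_eq_foldl_filter, PySem.List.foldl_append_eq_flatMap]
    simp [pvComp, pvNexts, List.map_flatMap, List.map_map, Function.comp_def]

theorem pvGrow_eq (k : Int) : ∀ (m : Nat) (ps : List (List Int)),
    pvGrow k m ps = ps.flatMap (fun p => (pvComp k m (pvLast p)).map (fun q => p ++ q)) := by
  intro m
  induction m with
  | zero => intro ps; simp [pvGrow, pvComp]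
  | succ m ih =>
    intro ps
    rw [pvGrow]
    by_cases hps : ps = []
    · rw [if_pos hps, hps]; rfl
    · rw [if_neg hps, ih (pvStep k ps)]
      simp only [pvStep, List.flatMap_assoc, List.flatMap_map, pvLast_append]
      simp [pvComp, pvNexts, List.map_flatMap, List.map_map, Function.comp_def]

-- ===== VERDICT (by name: the statement is the Claim_ definition above) =====
theorem unlockScroll_spec : Claim_equal_unlockScroll := by
  intro n k _ hpre
  unfold Spec_unlockScroll unlockScroll unlockScroll_alt
  by_cases hn : 1 ≤ n
  · obtain ⟨m, hm⟩ : ∃ m, n.toNat = m + 1 := ⟨(n - 1).toNat, by omega⟩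
    have hm' : (n - 1).toNat = m := by omega
    have hmi : (m : Int) + 1 = n := by omega
    have hne : ¬ ((([] : List Int)).length : Int) = n := by simp; omega
    rw [hm, hm', pvExplore, if_neg hne]
    have hstep : ∀ (a : List Int), ∀ d ∈ PySem.List.pyRange 0 10 1,
        (if ([] : List Int) = [] ∧ d = 0 then a
         else if ([] : List Int) ≠ [] ∧ ¬ (((d - pvLast []).natAbs : Int) = k) then a
         else pvExplore n k m ([] ++ [d]) a)
        = (if ¬ (d = 0) then
             a ++ (pvComp k m d).map (fun q => pvEmit (d :: q))
           else a) := by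
      intro a d _
      by_cases h0 : d = 0
      · simp [h0]
      · rw [if_neg (by simp [h0]), if_neg (by simp), if_pos h0]
        rw [show (([] : List Int) ++ [d]) = [d] from rfl]
        rw [pvExplore_eq n k m [d] a (by simp) (by simp; omega)]
        simp [pvLast_singleton]
    rw [PySem.List.foldl_congr_mem _ _ _ _ hstep]
    rw [PySem.List.foldl_ite_eq_foldl_filter, PySem.List.foldl_append_eq_flatMap]
    rw [if_pos hn, pvGrow_eq]
    have hfilter : (PySem.List.pyRange 0 10 1).filter (fun d => decide (¬ (d = 0)))
        = PySem.List.pyRange 1 10 1 := by decide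
    rw [hfilter]
    simp [List.flatMap_map, pvLast_singleton, List.map_flatMap, List.map_map,
      Function.comp_def]
  · have hn' : n < 0 := by rcases hpre with h | ⟨h, _⟩ <;> omega
    have hn0 : n.toNat = 0 := by omega
    have hn1 : (n - 1).toNat = 0 := by omega
    have hne0 : ¬ ((([] : List Int)).length : Int) = n := by simp; omega
    rw [hn0, hn1, pvExplore, if_neg hne0]
    simp [hn, pvGrow]
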